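-- pv_equiv track=rewrite | github.com/GowthamSagar310/Competitive-Programming-Problems | codeforces/all_solutions/1791B.py | solve
-- ===== SOURCE A (Python) =====
-- def solve(s):
--     x, y = 0, 0
--     for l in s:
--         if l == "L": x -= 1
--         if l == "R": x += 1
--         if l == "U": y += 1
--         if l == "D": y -= 1
--         if x == 1 and y == 1:
--             return "YES"
--     return "NO"
-- ===== SOURCE B (Python) =====
-- def solve(s):
--     # Decompose into two independent 1-D walks: the set of time indices at which
--     # x == 1 and the set at which y == 1; (1,1) is visited iff the sets intersect.
--     def hits(plus, minus):
--         v = 0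
--         idxs = set()
--         for i, c in enumerate(s):
--             v += (c == plus) - (c == minus)
--             if v == 1:
--                 idxs.add(i)
--         return idxs
--     return "YES" if hits("R", "L") & hits("U", "D") else "NO"
-- ===== Notes on version B (the rewrite author's own statement) =====
-- stated objective: alternative
-- what changed: B replaces A's single joint 2-D walk with inline target test by a dimension decomposition: two independent 1-D walks each produce the set of time indices at which that coordinate equals 1, and the answer is whether the two index sets intersect.
import Mathlib
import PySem

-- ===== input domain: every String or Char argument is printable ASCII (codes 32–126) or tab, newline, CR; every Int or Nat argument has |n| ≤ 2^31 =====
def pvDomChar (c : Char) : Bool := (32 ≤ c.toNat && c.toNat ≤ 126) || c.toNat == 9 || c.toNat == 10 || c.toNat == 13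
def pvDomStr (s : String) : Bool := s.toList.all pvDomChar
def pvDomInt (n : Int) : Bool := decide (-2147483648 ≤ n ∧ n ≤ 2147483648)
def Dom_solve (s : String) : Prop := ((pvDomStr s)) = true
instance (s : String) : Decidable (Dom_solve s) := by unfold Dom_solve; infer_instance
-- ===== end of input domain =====

-- B decomposes A's joint 2-D walk into two independent 1-D walks whose hit-index sets are intersected; return values proved equal.

-- ===== PORT A =====
-- A's loop with early return: structural recursion over the chars carrying (x, y).
def solveAux : List Char → Int → Int → String
  | [], _, _ => "NO"
  | l :: rest, x, y =>
    let x := if l == 'L' then x - 1 else x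
    let x := if l == 'R' then x + 1 else x
    let y := if l == 'U' then y + 1 else y
    let y := if l == 'D' then y - 1 else y
    if x == 1 && y == 1 then "YES" else solveAux rest x y

def solve (s : String) : String := solveAux s.toList 0 0

-- ===== PORT B =====
-- (c == plus) - (c == minus)
def deltaOf (plus minus c : Char) : Int :=
  (if c == plus then 1 else 0) - (if c == minus then 1 else 0)

-- the 'for i, c in enumerate(s)' loop of B's helper 'hits', carrying (v, idxs)
def hitsLoop (plus minus : Char) : List (Int × Char) → Int → PySem.Set Int → PySem.Set Int
  | [], _, idxs => idxs
  | (i, c) :: rest, v, idxs =>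
    let v := v + deltaOf plus minus c
    hitsLoop plus minus rest v (if v == 1 then PySem.Set.add idxs i else idxs)

-- B's helper hits(plus, minus)
def hits (s : String) (plus minus : Char) : PySem.Set Int :=
  hitsLoop plus minus (PySem.List.enumerate s.toList 0) 0 PySem.Set.empty

def solve_alt (s : String) : String :=
  if PySem.Set.inter (hits s 'R' 'L') (hits s 'U' 'D') ≠ [] then "YES" else "NO"

-- ===== PRECONDITION & SPEC =====
def Spec_solve (s : String) (out : String) : Prop := out = solve_alt s
instance (s : String) (out : String) : Decidable (Spec_solve s out) := by unfold Spec_solve; infer_instance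

-- ===== CLAIM (what is proved, stated in full; the proofs are below) =====
def Claim_equal_solve : Prop := ∀ (s : String), Dom_solve s → Spec_solve s (solve s)

-- ===== LEMMAS AND PROOFS =====

-- value of a 1-D prefix walk after processing k+1 characters
def prefVal (plus minus : Char) : List Char → Int → Nat → Int
  | [], v, _ => v
  | c :: _, v, 0 => v + deltaOf plus minus c
  | c :: rest, v, k+1 => prefVal plus minus rest (v + deltaOf plus minus c) k

theorem mem_hitsLoop (plus minus : Char) :
    ∀ (cs : List Char) (i0 v : Int) (acc : PySem.Set Int) (j : Int),
      j ∈ hitsLoop plus minus (PySem.List.enumerate cs i0) v acc ↔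
        j ∈ acc ∨ ∃ k : Nat, k < cs.length ∧ j = i0 + k ∧ prefVal plus minus cs v k = 1 := by
  intro cs
  induction cs with
  | nil => intro i0 v acc j; simp [PySem.List.enumerate_nil, hitsLoop]
  | cons c rest ih =>
    intro i0 v acc j
    rw [PySem.List.enumerate_cons]
    simp only [hitsLoop, ih]
    constructor
    · rintro (hm | ⟨k, hk, hj, hp⟩)
      · by_cases h1 : v + deltaOf plus minus c = 1
        · simp [h1, PySem.Set.mem_add] at hm
          rcases hm with hm | hm
          · exact Or.inl hm
          · exact Or.inr ⟨0, by simp, by omega, by simpa [prefVal]⟩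
        · simp [h1] at hm
          exact Or.inl hm
      · exact Or.inr ⟨k + 1, by simpa using hk, by push_cast; omega, by simpa [prefVal] using hp⟩
    · rintro (hm | ⟨k, hk, hj, hp⟩)
      · left
        by_cases h1 : v + deltaOf plus minus c = 1 <;>
          simp [h1, PySem.Set.mem_add, hm]
      · cases k with
        | zero =>
          simp only [prefVal] at hp
          left
          simp [hp, PySem.Set.mem_add]
          right; omega
        | succ k' =>
          right
          exact ⟨k', by simpa using hk, by push_cast at hj ⊢; omega, by simpa [prefVal] using hp⟩

-- A's if-chain on x equals one delta step of the x walk; same for y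
theorem chain_x (x : Int) (c : Char) :
    (if c == 'R' then (if c == 'L' then x - 1 else x) + 1 else (if c == 'L' then x - 1 else x))
      = x + deltaOf 'R' 'L' c := by
  simp only [deltaOf]
  by_cases hL : c = 'L' <;> by_cases hR : c = 'R' <;> first | (simp_all; omega) | simp_all

theorem chain_y (y : Int) (c : Char) :
    (if c == 'D' then (if c == 'U' then y + 1 else y) - 1 else (if c == 'U' then y + 1 else y))
      = y + deltaOf 'U' 'D' c := by
  simp only [deltaOf]
  by_cases hU : c = 'U' <;> by_cases hD : c = 'D' <;> first | (simp_all; omega) | simp_all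

theorem solveAux_yes_iff : ∀ (cs : List Char) (x y : Int),
    solveAux cs x y = "YES" ↔
      ∃ k : Nat, k < cs.length ∧ prefVal 'R' 'L' cs x k = 1 ∧ prefVal 'U' 'D' cs y k = 1 := by
  intro cs
  induction cs with
  | nil => intro x y; simp [solveAux]
  | cons c rest ih =>
    intro x y
    simp only [solveAux]
    rw [chain_x x c, chain_y y c]
    by_cases h1 : x + deltaOf 'R' 'L' c = 1 ∧ y + deltaOf 'U' 'D' c = 1
    · simp only [h1.1, h1.2]
      constructor
      · intro _; exact ⟨0, by simp, by simp [prefVal, h1.1], by simp [prefVal, h1.2]⟩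
      · intro _; simp
    · have hcond : ((x + deltaOf 'R' 'L' c == 1) && (y + deltaOf 'U' 'D' c == 1)) = false := by
        rcases not_and_or.mp h1 with h | h <;> simp [h]
      rw [hcond]
      simp only [Bool.false_eq_true, if_false, ih]
      constructor
      · rintro ⟨k, hk, hx, hy⟩
        exact ⟨k + 1, by simpa using hk, by simpa [prefVal] using hx, by simpa [prefVal] using hy⟩
      · rintro ⟨k, hk, hx, hy⟩
        cases k with
        | zero =>
          exfalso
          simp only [prefVal] at hx hy
          exact h1 ⟨hx, hy⟩
        | succ k' =>
          exact ⟨k', by simpa using hk, by simpa [prefVal] using hx, by simpa [prefVal] using hy⟩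

theorem solveAux_total (cs : List Char) : ∀ (x y : Int),
    solveAux cs x y = "YES" ∨ solveAux cs x y = "NO" := by
  induction cs with
  | nil => intro x y; right; rfl
  | cons c rest ih =>
    intro x y
    simp only [solveAux]
    rw [chain_x x c, chain_y y c]
    split
    · left; rfl
    · exact ih _ _

-- ===== VERDICT (by name: the statement is the Claim_ definition above) =====
theorem solve_spec : Claim_equal_solve := by
  intro s _
  unfold Spec_solve solve solve_alt
  have hmain : solveAux s.toList 0 0 = "YES" ↔
      PySem.Set.inter (hits s 'R' 'L') (hits s 'U' 'D') ≠ [] := by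
    rw [solveAux_yes_iff]
    rw [ne_eq, List.eq_nil_iff_forall_not_mem]
    push Not
    constructor
    · rintro ⟨k, hk, hx, hy⟩
      refine ⟨(k : Int), ?_⟩
      rw [PySem.Set.mem_inter]
      constructor
      · unfold hits
        rw [mem_hitsLoop]
        exact Or.inr ⟨k, hk, by omega, hx⟩
      · unfold hits
        rw [mem_hitsLoop]
        exact Or.inr ⟨k, hk, by omega, hy⟩
    · rintro ⟨j, hj⟩
      rw [PySem.Set.mem_inter] at hj
      obtain ⟨hjx, hjy⟩ := hj
      unfold hits at hjx hjy
      rw [mem_hitsLoop] at hjx hjy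
      rcases hjx with h | ⟨k, hk, hjk, hx⟩
      · simp [PySem.Set.empty] at h
      rcases hjy with h | ⟨k', hk', hjk', hy⟩
      · simp [PySem.Set.empty] at h
      have : k = k' := by omega
      subst this
      exact ⟨k, hk, hx, hy⟩
  rcases solveAux_total s.toList 0 0 with h | h
  · rw [h, if_pos (hmain.mp h)]
  · rw [h]
    by_cases hc : PySem.Set.inter (hits s 'R' 'L') (hits s 'U' 'D') ≠ []
    · exact absurd (hmain.mpr hc) (by simp [h])
    · rw [if_neg hc]
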